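-- pv_equiv track=rewrite | github.com/daniel-reich/ubiquitous-fiesta | 26P2iwW5WfwPGJyWE_24.py | possibly_perfect
-- ===== SOURCE A (Python) =====
-- def possibly_perfect(key, answers):
--   arr = []
--   for i in range(len(answers)):
--     if key[i] != '_':
--         arr.append(key[i] == answers[i])
--   if len(set(arr)) == 1:
--     return True
--   return False
-- ===== SOURCE B (Python) =====
-- def possibly_perfect(key, answers):
--   n = len(answers)
--   j = 0
--   while j < n and key[j] == '_':
--     j += 1
--   if j == n:
--     return False
--   ref = key[j] == answers[j]
--   for i in range(j + 1, n):
--     if key[i] != '_' and (key[i] == answers[i]) != ref: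
--       return False
--   return True
-- ===== Notes on version B (the rewrite author's own statement) =====
-- stated objective: faster
-- what changed: Instead of collecting every comparison boolean and testing set cardinality, B scans for the first non-blank key position, takes its match/mismatch outcome as the reference, and then verifies with early exit that every later non-blank position has the same outcome.
import Mathlib
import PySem

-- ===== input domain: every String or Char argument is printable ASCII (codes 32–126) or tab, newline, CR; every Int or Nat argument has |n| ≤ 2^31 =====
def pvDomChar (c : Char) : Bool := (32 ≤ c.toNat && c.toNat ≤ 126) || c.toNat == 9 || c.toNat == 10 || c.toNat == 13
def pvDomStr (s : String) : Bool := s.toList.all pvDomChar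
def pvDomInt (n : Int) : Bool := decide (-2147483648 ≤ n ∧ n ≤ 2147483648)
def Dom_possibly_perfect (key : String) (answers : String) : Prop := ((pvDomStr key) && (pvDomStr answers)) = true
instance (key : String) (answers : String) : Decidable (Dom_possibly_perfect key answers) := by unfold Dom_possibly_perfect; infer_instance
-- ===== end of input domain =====

-- B replaces A's collect-all-comparisons-then-set-cardinality check with a first-reference
-- scan: find the first non-blank key position, then verify (with early exit) that every later
-- non-blank position has the same match/mismatch outcome. Equivalence on Pre_ (key at least
-- as long as answers; shorter keys make Python's key[i] raise IndexError).

-- ===== PORT A =====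
def possibly_perfect (key : String) (answers : String) : Bool :=
  let ks := key.toList
  let ans := answers.toList
  let arr := (PySem.List.pyRange 0 (ans.length : Int) 1).foldl
    (fun arr i =>
      if PySem.List.pyGetD ks i ' ' ≠ '_' then
        arr ++ [PySem.List.pyGetD ks i ' ' == PySem.List.pyGetD ans i ' ']
      else arr) ([] : List Bool)
  if PySem.Set.len (PySem.Set.ofList arr) == 1 then true else false

-- ===== PORT B =====
-- the while loop 'while j < n and key[j] == '_': j += 1'
def ppFind (ks : List Char) (n : Nat) (j : Nat) : Nat :=
  if h : j < n ∧ PySem.List.pyGetD ks (j : Int) ' ' = '_' then ppFind ks n (j + 1) else j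
termination_by n - j
decreasing_by omega

def possibly_perfect_alt (key : String) (answers : String) : Bool :=
  let ks := key.toList
  let ans := answers.toList
  let n := ans.length
  let j := ppFind ks n 0
  if j == n then false
  else
    let ref := PySem.List.pyGetD ks (j : Int) ' ' == PySem.List.pyGetD ans (j : Int) ' '
    -- the for-loop with early 'return False', as an .all over the remaining indices
    (PySem.List.pyRange ((j : Int) + 1) (n : Int) 1).all (fun i =>
      !(decide (PySem.List.pyGetD ks i ' ' ≠ '_') &&
        ((PySem.List.pyGetD ks i ' ' == PySem.List.pyGetD ans i ' ') != ref)))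

-- ===== PRECONDITION & SPEC =====
-- Pre_ excludes exactly the inputs where Python A raises IndexError: key shorter than answers.
def Pre_possibly_perfect (key : String) (answers : String) : Prop :=
  answers.toList.length ≤ key.toList.length
instance (key : String) (answers : String) : Decidable (Pre_possibly_perfect key answers) := by
  unfold Pre_possibly_perfect; infer_instance

def pvWitness_possibly_perfect : String × String := ("ab_c", "abd")

def Spec_possibly_perfect (key : String) (answers : String) (out : Bool) : Prop := out = possibly_perfect_alt key answers
instance (key : String) (answers : String) (out : Bool) : Decidable (Spec_possibly_perfect key answers out) := by unfold Spec_possibly_perfect; infer_instance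

-- ===== CLAIM =====
def Claim_equal_possibly_perfect : Prop := ∀ (key : String) (answers : String), Dom_possibly_perfect key answers → Pre_possibly_perfect key answers → Spec_possibly_perfect key answers (possibly_perfect key answers)

-- ===== LEMMAS AND PROOFS =====

-- 'all comparisons agree (list nonempty)' on a list of booleans
def pvAllEq : List Bool → Bool
  | [] => false
  | b :: t => t.all (· == b)

-- the comparison list at the non-blank positions of an index list
def pvArr (ks ans : List Char) (L : List Int) : List Bool :=
  L.filterMap (fun i =>
    if PySem.List.pyGetD ks i ' ' = '_' then none
    else some (PySem.List.pyGetD ks i ' ' == PySem.List.pyGetD ans i ' '))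

-- A's accumulation loop produces exactly pvArr
theorem pv_foldA (ks ans : List Char) (L : List Int) (arr : List Bool) :
    L.foldl
      (fun arr i =>
        if PySem.List.pyGetD ks i ' ' ≠ '_' then
          arr ++ [PySem.List.pyGetD ks i ' ' == PySem.List.pyGetD ans i ' ']
        else arr) arr
    = arr ++ pvArr ks ans L := by
  induction L generalizing arr with
  | nil => simp [pvArr]
  | cons i L ih =>
    by_cases h : PySem.List.pyGetD ks i ' ' = '_'
    · have hp : pvArr ks ans (i :: L) = pvArr ks ans L := by
        simp only [pvArr, List.filterMap_cons, if_pos h]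
      rw [List.foldl_cons, if_neg (not_not_intro h), ih, hp]
    · have hp : pvArr ks ans (i :: L)
          = (PySem.List.pyGetD ks i ' ' == PySem.List.pyGetD ans i ' ') :: pvArr ks ans L := by
        simp only [pvArr, List.filterMap_cons, if_neg h]
      rw [List.foldl_cons, if_pos h, ih, hp]
      simp

-- A's set-cardinality test equals the uniformity test pvAllEq
theorem pv_bridge (arr : List Bool) :
    (if PySem.Set.len (PySem.Set.ofList arr) == 1 then true else false) = pvAllEq arr := by
  have hmem : ∀ x, x ∈ PySem.Set.ofList arr ↔ x ∈ arr := fun x => PySem.Set.mem_ofList arr x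
  by_cases ht : true ∈ arr <;> by_cases hf : false ∈ arr
  · -- both values occur: set has ≥ 2 elements, and uniformity fails
    have hne1 : (PySem.Set.ofList arr).length ≠ 1 := by
      intro h
      rcases List.length_eq_one_iff.mp h with ⟨a, ha⟩
      have h1 : true ∈ PySem.Set.ofList arr := (hmem true).mpr ht
      have h2 : false ∈ PySem.Set.ofList arr := (hmem false).mpr hf
      rw [ha] at h1 h2; simp at h1 h2; simp [h1] at h2
    have hun : pvAllEq arr = false := by
      cases arr with
      | nil => simp at ht
      | cons b t =>
        by_contra h
        rw [Bool.not_eq_false] at h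
        unfold pvAllEq at h
        rw [List.all_eq_true] at h
        have hall : ∀ x ∈ b :: t, x = b := by
          intro x hx
          rcases List.mem_cons.mp hx with h1 | h1
          · exact h1
          · simpa using h x h1
        have h1 := hall true ht
        have h2 := hall false hf
        simp [← h1] at h2
    simp only [PySem.Set.len]
    simp [hne1, hun]
  · -- only true occurs
    have hall : ∀ x ∈ arr, x = true := fun x hx => by cases x <;> simp_all
    have hnd : (PySem.Set.ofList arr).Nodup := PySem.Set.nodup_ofList arr
    have hs : PySem.Set.ofList arr = [true] := by
      have hne : PySem.Set.ofList arr ≠ [] := by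
        intro h; rw [h] at hmem; simpa using ((hmem true).mpr ht)
      match hS : PySem.Set.ofList arr, hnd, hne with
      | [a], _, _ =>
        have := hall a ((hmem a).mp (by rw [hS]; simp))
        simp [this]
      | a :: c :: t, hnd, _ =>
        have ha := hall a ((hmem a).mp (by rw [hS]; simp))
        have hc := hall c ((hmem c).mp (by rw [hS]; simp))
        rw [List.nodup_cons] at hnd
        exact absurd (by simp [ha, hc.symm] : a ∈ c :: t) hnd.1
    have hun : pvAllEq arr = true := by
      cases arr with
      | nil => simp at ht
      | cons b t =>
        unfold pvAllEq
        rw [List.all_eq_true]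
        intro x hx
        have h1 := hall b List.mem_cons_self
        have h2 := hall x (List.mem_cons_of_mem _ hx)
        simp [h1, h2]
    simp [PySem.Set.len, hs, hun]
  · -- only false occurs
    have hall : ∀ x ∈ arr, x = false := fun x hx => by cases x <;> simp_all
    have hnd : (PySem.Set.ofList arr).Nodup := PySem.Set.nodup_ofList arr
    have hs : PySem.Set.ofList arr = [false] := by
      have hne : PySem.Set.ofList arr ≠ [] := by
        intro h; rw [h] at hmem; simpa using ((hmem false).mpr hf)
      match hS : PySem.Set.ofList arr, hnd, hne with
      | [a], _, _ =>
        have := hall a ((hmem a).mp (by rw [hS]; simp))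
        simp [this]
      | a :: c :: t, hnd, _ =>
        have ha := hall a ((hmem a).mp (by rw [hS]; simp))
        have hc := hall c ((hmem c).mp (by rw [hS]; simp))
        rw [List.nodup_cons] at hnd
        exact absurd (by simp [ha, hc.symm] : a ∈ c :: t) hnd.1
    have hun : pvAllEq arr = true := by
      cases arr with
      | nil => simp at hf
      | cons b t =>
        unfold pvAllEq
        rw [List.all_eq_true]
        intro x hx
        have h1 := hall b List.mem_cons_self
        have h2 := hall x (List.mem_cons_of_mem _ hx)
        simp [h1, h2]
    simp [PySem.Set.len, hs, hun]
  · -- neither occurs: arr is empty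
    have harr : arr = [] := by
      cases arr with
      | nil => rfl
      | cons a t => cases a <;> simp_all
    simp [harr, PySem.Set.len, PySem.Set.ofList, pvAllEq]

-- B's early-exit check loop equals uniformity of pvArr w.r.t. the reference value
theorem pv_allcheck (ks ans : List Char) (ref : Bool) (L : List Int) :
    (L.all (fun i =>
      !(decide (PySem.List.pyGetD ks i ' ' ≠ '_') &&
        ((PySem.List.pyGetD ks i ' ' == PySem.List.pyGetD ans i ' ') != ref))))
    = (pvArr ks ans L).all (· == ref) := by
  induction L with
  | nil => simp [pvArr]
  | cons i L ih =>
    by_cases h : PySem.List.pyGetD ks i ' ' = '_'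
    · have hp : pvArr ks ans (i :: L) = pvArr ks ans L := by
        simp only [pvArr, List.filterMap_cons, if_pos h]
      rw [List.all_cons, hp, ih]
      simp [h]
    · have hp : pvArr ks ans (i :: L)
          = (PySem.List.pyGetD ks i ' ' == PySem.List.pyGetD ans i ' ') :: pvArr ks ans L := by
        simp only [pvArr, List.filterMap_cons, if_neg h]
      rw [List.all_cons, hp, List.all_cons, ih]
      cases hb : (PySem.List.pyGetD ks i ' ' == PySem.List.pyGetD ans i ' ') <;> cases ref <;>
        simp [h, hb]

-- the whole of B from position j equals pvAllEq of the comparison list over indices [j, n)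
theorem pv_main (ks ans : List Char) (n : Nat) (k : Nat) (j : Nat) (hk : n - j ≤ k) (hj : j ≤ n) :
    (if ppFind ks n j == n then false
     else
       (PySem.List.pyRange ((ppFind ks n j : Int) + 1) (n : Int) 1).all (fun i =>
         !(decide (PySem.List.pyGetD ks i ' ' ≠ '_') &&
           ((PySem.List.pyGetD ks i ' ' == PySem.List.pyGetD ans i ' ')
             != (PySem.List.pyGetD ks (ppFind ks n j : Int) ' ' ==
                 PySem.List.pyGetD ans (ppFind ks n j : Int) ' ')))))
    = pvAllEq (pvArr ks ans (PySem.List.pyRange (j : Int) (n : Int) 1)) := by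
  induction k generalizing j with
  | zero =>
    have hjn : j = n := by omega
    subst hjn
    rw [ppFind]
    simp [PySem.List.pyRange_one_eq_nil (le_refl (j : Int)), pvArr, pvAllEq]
  | succ k ih =>
    by_cases hlt : j < n
    · have hcons : PySem.List.pyRange (j : Int) (n : Int) 1
          = (j : Int) :: PySem.List.pyRange ((j : Int) + 1) (n : Int) 1 :=
        PySem.List.pyRange_one_cons (by exact_mod_cast hlt)
      by_cases hu : PySem.List.pyGetD ks (j : Int) ' ' = '_'
      · -- blank position: the while loop advances, pvArr drops j
        have hstep : ppFind ks n j = ppFind ks n (j + 1) := by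
          rw [ppFind, dif_pos ⟨hlt, hu⟩]
        have harr : pvArr ks ans ((j : Int) :: PySem.List.pyRange ((j : Int) + 1) (n : Int) 1)
            = pvArr ks ans (PySem.List.pyRange ((j : Int) + 1) (n : Int) 1) := by
          simp only [pvArr, List.filterMap_cons, if_pos hu]
        have hc : ((j : Int) + 1) = ((j + 1 : Nat) : Int) := by push_cast; ring
        rw [hstep, hcons, harr, hc]
        exact ih (j + 1) (by omega) (by omega)
      · -- first non-blank position: the while loop stops here
        have hstop : ppFind ks n j = j := by
          rw [ppFind, dif_neg (fun hc => hu hc.2)]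
        have hjn : (j == n) = false := by simp; omega
        have harr : pvArr ks ans ((j : Int) :: PySem.List.pyRange ((j : Int) + 1) (n : Int) 1)
            = (PySem.List.pyGetD ks (j : Int) ' ' == PySem.List.pyGetD ans (j : Int) ' ')
              :: pvArr ks ans (PySem.List.pyRange ((j : Int) + 1) (n : Int) 1) := by
          simp only [pvArr, List.filterMap_cons, if_neg hu]
        rw [hstop, hjn, hcons, harr]
        simp only [Bool.false_eq_true, if_false, pvAllEq]
        exact pv_allcheck ks ans _ _
    · have hjn : j = n := by omega
      subst hjn
      rw [ppFind]
      simp [PySem.List.pyRange_one_eq_nil (le_refl (j : Int)), pvArr, pvAllEq]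

-- ===== VERDICT =====
theorem possibly_perfect_spec : Claim_equal_possibly_perfect := by
  intro key answers _ _
  unfold Spec_possibly_perfect possibly_perfect possibly_perfect_alt
  simp only
  rw [pv_foldA, pv_bridge]
  have h := pv_main key.toList answers.toList answers.toList.length
    answers.toList.length 0 (by omega) (by omega)
  simp only [Nat.cast_zero, List.nil_append] at h ⊢
  exact h.symm
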